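-- pv_equiv track=rewrite | github.com/Tohaker/AdventOfCode2019 | advent_of_code/day8/main.py | part_one
-- ===== SOURCE A (Python) =====
-- def parse_input(input, w, h):
--     lines = []
--     layers = []
--
--     for i in range(0, len(input), w):
--         lines.append(input[i: i + w])
--
--     for i in range(0, len(lines), h):
--         layers.append(lines[i: i + h])
--
--     return layers
--
-- def part_one(input, w=25, h=6):
--     image = parse_input(input[0], w, h)
--
--     layer_counts = list(map(lambda layer: sum(
--         [line.count('0') for line in layer]), image))
--     lowest_layer = layer_counts.index(min(layer_counts))
--
--     one_count = 0
--     two_count = 0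
--     for line in image[lowest_layer]:
--         one_count += line.count('1')
--         two_count += line.count('2')
--
--     return one_count * two_count
-- ===== SOURCE B (Python) =====
-- def part_one(input, w=25, h=6):
--     s = input[0]
--     size = w * h
--     layers = [s[i:i + size] for i in range(0, len(s), size)]
--     best = min(layers, key=lambda layer: layer.count('0'))
--     return best.count('1') * best.count('2')
-- ===== Notes on version B (the rewrite author's own statement) =====
-- stated objective: simpler
-- what changed: B drops the line-level parsing entirely: it slices the image into flat layer strings of length w*h in one comprehension and picks the fewest-zero layer with min(key=count), removing parse_input, the nested line lists, the per-line summation and the counts-list/index pass.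
import Mathlib
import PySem

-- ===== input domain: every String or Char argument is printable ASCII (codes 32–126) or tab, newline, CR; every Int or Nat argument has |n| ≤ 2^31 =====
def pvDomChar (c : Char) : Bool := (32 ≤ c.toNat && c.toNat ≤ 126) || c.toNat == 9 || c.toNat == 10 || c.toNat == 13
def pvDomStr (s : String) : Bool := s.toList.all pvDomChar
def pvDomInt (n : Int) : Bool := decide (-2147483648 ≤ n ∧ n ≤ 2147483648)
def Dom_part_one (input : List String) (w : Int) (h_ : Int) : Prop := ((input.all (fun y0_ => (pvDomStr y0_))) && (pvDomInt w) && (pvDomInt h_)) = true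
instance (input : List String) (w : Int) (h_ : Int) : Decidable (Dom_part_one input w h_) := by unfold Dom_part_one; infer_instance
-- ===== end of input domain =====

-- B replaces A's nested line-level parsing by flat w*h layer slices and min(key=count); objective: simpler.

-- ===== PORT A =====
def parse_input (input : String) (w : Int) (h_ : Int) : List (List String) :=
  let lines := (PySem.List.pyRange 0 (PySem.Str.len input) w).foldl
    (fun acc i => acc ++ [PySem.Str.slice input (some i) (some (i + w))]) []
  let layers := (PySem.List.pyRange 0 (lines.length : Int) h_).foldl
    (fun acc i => acc ++ [PySem.List.slice lines (some i) (some (i + h_))]) []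
  layers

def part_one (input : List String) (w : Int) (h_ : Int) : Int :=
  let s := (PySem.List.pyGet? input 0).getD ""      -- input[0]; default unreachable under Pre_
  let image := parse_input s w h_
  let layer_counts := image.map
    (fun layer => ((layer.map (fun line => (PySem.Str.count line "0" : Int))).sum))
  match PySem.List.min? layer_counts (fun y => y) with
  | none => 0                                        -- min([]) raises in Python; excluded by Pre_
  | some m =>
    let lowest : Nat := (PySem.List.index? layer_counts m).getD 0
    let layer := PySem.List.pyGetD image (lowest : Int) []
    let p := layer.foldl
      (fun (acc : Int × Int) line =>
        (acc.1 + (PySem.Str.count line "1" : Int), acc.2 + (PySem.Str.count line "2" : Int)))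
      (0, 0)
    p.1 * p.2

-- ===== PORT B =====
def part_one_alt (input : List String) (w : Int) (h_ : Int) : Int :=
  let s := (PySem.List.pyGet? input 0).getD ""      -- input[0]; default unreachable under Pre_
  let size := w * h_
  let layers := (PySem.List.pyRange 0 (PySem.Str.len s) size).map
    (fun i => PySem.Str.slice s (some i) (some (i + size)))
  match PySem.List.min? layers (fun layer => PySem.Str.count layer "0") with
  | none => 0                                        -- min([]) raises in Python; excluded by Pre_
  | some best => (PySem.Str.count best "1" : Int) * (PySem.Str.count best "2" : Int)

-- ===== PRECONDITION & SPEC =====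
-- A raises outside Pre_: IndexError on empty input, ValueError on step <= 0 (range / min of empty),
-- and ValueError (min of empty) when the first string is empty.
def Pre_part_one (input : List String) (w : Int) (h_ : Int) : Prop :=
  input ≠ [] ∧ 0 < w ∧ 0 < h_ ∧ input.headD "" ≠ ""
instance (input : List String) (w : Int) (h_ : Int) : Decidable (Pre_part_one input w h_) := by
  unfold Pre_part_one; infer_instance

def pvWitness_part_one : List String × Int × Int := (["120012"], 3, 1)

def Spec_part_one (input : List String) (w : Int) (h_ : Int) (out : Int) : Prop :=
  out = part_one_alt input w h_
instance (input : List String) (w : Int) (h_ : Int) (out : Int) : Decidable (Spec_part_one input w h_ out) := by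
  unfold Spec_part_one; infer_instance

-- ===== CLAIM (what is proved, stated in full; the proofs are below) =====
def Claim_equal_part_one : Prop := ∀ (input : List String) (w : Int) (h_ : Int),
  Dom_part_one input w h_ → Pre_part_one input w h_ → Spec_part_one input w h_ (part_one input w h_)

-- ===== LEMMAS AND PROOFS =====

def pvChunks {α : Type} (c : Nat) (xs : List α) : List (List α) :=
  if h' : xs = [] ∨ c = 0 then [] else xs.take c :: pvChunks c (xs.drop c)
termination_by xs.length
decreasing_by
  rcases xs with _ | ⟨a, t⟩
  · exact absurd (Or.inl rfl) h'
  · have hc : c ≠ 0 := fun hc0 => h' (Or.inr hc0)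
    simp [List.length_drop]
    omega
theorem pvChunks_nil {α : Type} (c : Nat) : pvChunks c ([] : List α) = [] := by
  unfold pvChunks; simp
theorem pvChunks_cons {α : Type} {c : Nat} {xs : List α} (hc : 0 < c) (hx : xs ≠ []) :
    pvChunks c xs = xs.take c :: pvChunks c (xs.drop c) := by
  conv_lhs => unfold pvChunks
  simp [hx, Nat.pos_iff_ne_zero.mp hc]
theorem pvChunks_ne_nil {α : Type} {c : Nat} {xs : List α} (hc : 0 < c) (hx : xs ≠ []) :
    pvChunks c xs ≠ [] := by
  rw [pvChunks_cons hc hx]; simp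

theorem pvChunks_map {α β : Type} (g : α → β) (c : Nat) (xs : List α) :
    pvChunks c (xs.map g) = (pvChunks c xs).map (List.map g) := by
  by_cases hc : c = 0
  · subst hc; unfold pvChunks; simp
  have hc' : 0 < c := Nat.pos_of_ne_zero hc
  induction hn : xs.length using Nat.strong_induction_on generalizing xs with
  | _ n ih =>
    rcases eq_or_ne xs [] with rfl | hx
    · simp [pvChunks_nil]
    · have hgx : xs.map g ≠ [] := by simpa using hx
      rw [pvChunks_cons hc' hgx]
      conv_rhs => rw [pvChunks_cons hc' hx]
      rw [List.map_cons]
      congr 1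
      · simp [List.map_take]
      · rw [← List.map_drop]
        subst hn
        exact ih (xs.drop c).length (by rw [List.length_drop]; exact Nat.sub_lt (List.length_pos_iff.mpr hx) hc') _ rfl

theorem pvChunks_flatten_take {α : Type} {c : Nat} (hc : 0 < c) (H : Nat) (xs : List α) :
    ((pvChunks c xs).take H).flatten = xs.take (H * c) := by
  induction H generalizing xs with
  | zero => simp
  | succ H ih =>
    rcases eq_or_ne xs [] with rfl | hx
    · simp [pvChunks_nil]
    · rw [pvChunks_cons hc hx, List.take_succ_cons, List.flatten_cons, ih,
        Nat.succ_mul, Nat.add_comm, List.take_add]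

theorem pvChunks_drop {α : Type} {c : Nat} (hc : 0 < c) (H : Nat) (xs : List α) :
    (pvChunks c xs).drop H = pvChunks c (xs.drop (H * c)) := by
  induction H generalizing xs with
  | zero => simp
  | succ H ih =>
    rcases eq_or_ne xs [] with rfl | hx
    · simp [pvChunks_nil]
    · rw [pvChunks_cons hc hx, List.drop_succ_cons, ih, List.drop_drop]
      congr 2
      ring

theorem pvChunks_compose {α : Type} {W H : Nat} (hW : 0 < W) (hH : 0 < H) (xs : List α) :
    (pvChunks H (pvChunks W xs)).map List.flatten = pvChunks (W * H) xs := by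
  have hWH : 0 < W * H := Nat.mul_pos hW hH
  induction hn : xs.length using Nat.strong_induction_on generalizing xs with
  | _ n ih =>
    rcases eq_or_ne xs [] with rfl | hx
    · simp [pvChunks_nil]
    · rw [pvChunks_cons hH (pvChunks_ne_nil hW hx), List.map_cons,
        pvChunks_flatten_take hW, pvChunks_drop hW, pvChunks_cons hWH hx]
      rw [Nat.mul_comm H W]
      congr 1
      subst hn
      exact ih (xs.drop (W * H)).length
        (by rw [List.length_drop]; exact Nat.sub_lt (List.length_pos_iff.mpr hx) hWH) _ rfl

theorem pvCeil_rec {n c : Nat} (hc : 0 < c) (hn : 0 < n) :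
    (n + c - 1) / c = (n - c + c - 1) / c + 1 := by
  rcases Nat.lt_or_ge n c with h' | h
  case inr =>
    have : n + c - 1 = (n - c + c - 1) + c := by omega
    rw [this, Nat.add_div_right _ hc]
  case inl =>
    have h1 : n - c = 0 := by omega
    rw [h1, show n + c - 1 = (n - 1) + c by omega, Nat.add_div_right _ hc,
      Nat.div_eq_of_lt (by omega), Nat.div_eq_of_lt (by omega)]


theorem pvRangeMap_chunks {α : Type} {c : Nat} (hc : 0 < c) (xs : List α) :
    (List.range ((xs.length + c - 1) / c)).map (fun k => (xs.drop (c * k)).take c)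
      = pvChunks c xs := by
  induction hn : xs.length using Nat.strong_induction_on generalizing xs with
  | _ n ih =>
    subst hn
    rcases eq_or_ne xs [] with rfl | hx
    · rw [pvChunks_nil]
      rw [show ([] : List α).length + c - 1 = c - 1 by simp, Nat.div_eq_of_lt (by omega)]
      simp
    · have hlen : 0 < xs.length := List.length_pos_iff.mpr hx
      rw [pvCeil_rec hc hlen, List.range_succ_eq_map, List.map_cons, List.map_map,
        pvChunks_cons hc hx]
      congr 1
      case h.inr.e_tail =>
        have ihx := ih (xs.drop c).length
            (by rw [List.length_drop]; exact Nat.sub_lt hlen hc) (xs.drop c) rfl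
        rw [List.length_drop] at ihx
        rw [← ihx]
        apply List.map_congr_left
        intro k _
        simp only [Function.comp, Nat.succ_eq_add_one, List.drop_drop]
        congr 2
        ring

theorem pvRange_slices_eq_chunks {α : Type} (c : Nat) (hc : 0 < c) (xs : List α) :
    (PySem.List.pyRange 0 (xs.length : Int) (c : Int)).map
      (fun i => PySem.List.slice xs (some i) (some (i + (c : Int)))) = pvChunks c xs := by
  have hc' : (0:Int) < (c:Int) := by exact_mod_cast hc
  rw [PySem.List.pyRange_of_pos _ _ hc', List.map_map]
  rcases eq_or_ne xs [] with rfl | hx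
  · simp [pvChunks_nil]
  · have hlen : 0 < xs.length := List.length_pos_iff.mpr hx
    rw [if_pos (by exact_mod_cast hlen)]
    have hm : ((((xs.length : Int) - 0 + (c:Int) - 1) / (c:Int)).toNat) = (xs.length + c - 1) / c := by
      have h1 : ((xs.length : Int) - 0 + (c:Int) - 1) = ((xs.length + c - 1 : Nat) : Int) := by
        omega
      rw [h1]
      rw [show ((xs.length + c - 1 : Nat) : Int) / (c : Int) = (((xs.length + c - 1) / c : Nat) : Int) from (Int.natCast_div _ _).symm]
      exact Int.toNat_natCast _
    rw [hm, ← pvRangeMap_chunks hc xs]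
    apply List.map_congr_left
    intro k _
    simp only [Function.comp]
    have h2 : ((0:Int) + (c:Int) * (k:Nat)) = ((c * k : Nat) : Int) := by push_cast; ring
    rw [h2]
    have := PySem.List.slice_natCast_add xs (c * k) c
    simpa using this

theorem pvCount_go (c : Char) : ∀ (l : List Char) (fuel : Nat) (acc : Nat),
    l.length ≤ fuel → PySem.Chars.count.go [c] fuel l acc = acc + l.count c := by
  intro l
  induction l with
  | nil => intro fuel acc _; cases fuel <;> simp [PySem.Chars.count.go]
  | cons a t ih =>
    intro fuel acc hf
    cases fuel with
    | zero => simp at hf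
    | succ f =>
      have ht : t.length ≤ f := by simpa using hf
      by_cases hac : a = c
      · subst hac
        have hpre : List.isPrefixOf [a] (a :: t) = true := by simp [List.isPrefixOf]
        simp only [PySem.Chars.count.go, hpre, if_true]
        rw [show List.drop (List.length [a]) (a :: t) = t by simp]
        rw [ih f (acc + 1) ht]
        simp
        omega
      · have hpre : List.isPrefixOf [c] (a :: t) = false := by
          simp [List.isPrefixOf]; exact fun h => absurd h.symm hac
        simp only [PySem.Chars.count.go, hpre]
        rw [ih f acc ht]
        simp [hac]

theorem pvCount_single (s : List Char) (c : Char) : PySem.Chars.count s [c] = s.count c := by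
  rw [PySem.Chars.count]
  simp only [List.isEmpty_cons, Bool.false_eq_true, if_false]
  simpa using pvCount_go c s s.length 0 (le_refl _)

theorem pvMin?_natCast {α : Type} (xs : List α) (g : α → Nat) :
    PySem.List.min? xs (fun a => ((g a : Nat) : Int)) = PySem.List.min? xs g := by
  simp only [PySem.List.min?]
  congr 1
  funext acc x
  rcases acc with _ | m
  · rfl
  · simp [Nat.cast_lt]

theorem pvMin?_cons_cons {α : Type} (f : α → Int) (x y : α) (t : List α) :
    PySem.List.min? (x :: y :: t) f = PySem.List.min? ((if f y < f x then y else x) :: t) f := by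
  simp only [PySem.List.min?, List.foldl_cons]
  congr 1
  split <;> simp

theorem pvArgmin {α : Type} (f : α → Int) :
    ∀ (xs : List α) (x : α), ∃ b k,
      PySem.List.min? (x :: xs) f = some b ∧
      PySem.List.min? ((x :: xs).map f) (fun y => y) = some (f b) ∧
      PySem.List.index? ((x :: xs).map f) (f b) = some k ∧
      (x :: xs)[k]? = some b := by
  intro xs
  induction xs with
  | nil =>
    intro x
    refine ⟨x, 0, ?_, ?_, ?_, ?_⟩
    · simp [PySem.List.min?]
    · simp [PySem.List.min?]
    · simpa using PySem.List.index?_cons_self (f x) []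
    · simp
  | cons y t ih =>
    intro x
    obtain ⟨b, k, h1, h2, h3, h4⟩ := ih (if f y < f x then y else x)
    have hmin : PySem.List.min? (x :: y :: t) f = some b := by
      rw [pvMin?_cons_cons]; exact h1
    have hmapmin : PySem.List.min? ((x :: y :: t).map f) (fun y => y) = some (f b) := by
      rw [List.map_cons, List.map_cons, pvMin?_cons_cons (fun y => y)]
      have : (if (f y) < (f x) then (f y) else (f x)) = f (if f y < f x then y else x) := by
        split <;> rfl
      rw [this]
      simpa using h2
    have hble : ∀ z ∈ (if f y < f x then y else x) :: t, f b ≤ f z :=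
      PySem.List.min?_isMin h1
    by_cases hyx : f y < f x
    · -- z = y; f b ≤ f y < f x
      simp only [if_pos hyx] at h1 h2 h3 h4 hble
      have hbfy : f b ≤ f y := hble y (by simp)
      have hxne : f x ≠ f b := by
        intro h; rw [h] at hyx; omega
      refine ⟨b, k + 1, hmin, hmapmin, ?_, ?_⟩
      · rw [List.map_cons, PySem.List.index?_cons_of_ne _ hxne, h3]
        rfl
      · simpa using h4
    · -- z = x
      simp only [if_neg hyx] at h1 h2 h3 h4 hble
      have hfxy : f x ≤ f y := by omega
      by_cases hbx : f x = f b
      · -- first position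
        have hk0 : k = 0 ∧ b = x := by
          rw [List.map_cons, hbx, PySem.List.index?_cons_self] at h3
          have hk : k = 0 := by injection h3 with h'; omega
          subst hk
          simp at h4
          exact ⟨rfl, h4.symm⟩
        obtain ⟨hk, hbx'⟩ := hk0
        refine ⟨b, 0, hmin, hmapmin, ?_, ?_⟩
        · rw [List.map_cons, ← hbx, PySem.List.index?_cons_self]
        · simp [hbx']
      · have hbltx : f b < f x := by
          have := hble x (by simp)
          omega
        have hyne : f y ≠ f b := by
          intro h; omega
        have hxne : f x ≠ f b := hbx
        -- k = j + 1 with index? (t.map f) (f b) = some j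
        rw [List.map_cons, PySem.List.index?_cons_of_ne _ hxne] at h3
        obtain ⟨j, hj, hkj⟩ : ∃ j, PySem.List.index? (t.map f) (f b) = some j ∧ k = j + 1 := by
          rcases ho : PySem.List.index? (t.map f) (f b) with _ | j
          · rw [ho] at h3; simp at h3
          · rw [ho] at h3; simp at h3; exact ⟨j, rfl, h3.symm⟩
        refine ⟨b, j + 2, hmin, hmapmin, ?_, ?_⟩
        · rw [List.map_cons, PySem.List.index?_cons_of_ne _ hxne,
            List.map_cons, PySem.List.index?_cons_of_ne _ hyne, hj]
          rfl
        · subst hkj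
          simpa using h4


-- per-layer: the summed per-line '0'-counts are the count over the concatenated layer
theorem pvLayerSum (layer : List String) (c : Char) (needle : String) (hn : needle.toList = [c]) :
    (layer.map (fun line => (PySem.Chars.count line.toList needle.toList : Int))).sum
      = (((layer.map String.toList).flatten.count c : Nat) : Int) := by
  rw [hn, List.count_flatten, Nat.cast_list_sum, List.map_map, List.map_map]
  congr 1
  apply List.map_congr_left
  intro line _
  simp [Function.comp, pvCount_single]

-- ===== VERDICT (by name: the statement is the Claim_ definition above) =====
theorem part_one_spec : Claim_equal_part_one := by
  intro input w h_ _ hpre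
  obtain ⟨hne, hw, hh, hhead⟩ := hpre
  rcases input with _ | ⟨s0, rest⟩
  · exact absurd rfl hne
  have hs0 : s0 ≠ "" := by simpa using hhead
  obtain ⟨W, rfl⟩ : ∃ W : Nat, w = (W : Int) := ⟨w.toNat, (Int.toNat_of_nonneg (le_of_lt hw)).symm⟩
  obtain ⟨H, rfl⟩ : ∃ H : Nat, h_ = (H : Int) := ⟨h_.toNat, (Int.toNat_of_nonneg (le_of_lt hh)).symm⟩
  have hW : 0 < W := by omega
  have hH : 0 < H := by omega
  have hsL : s0.toList ≠ [] := by simpa [String.toList_eq_nil_iff] using hs0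
  have hget : (PySem.List.pyGet? (s0 :: rest) 0).getD "" = s0 := by
    simp [PySem.List.pyGet?, PySem.List.pyIdx?]
  have hlenB : PySem.Str.len s0 = (s0.toList.length : Int) := by simp [PySem.Str.len_eq]
  -- B's flat layers, as char lists, are the (w*h)-chunks of the image string
  have hBtoList :
      ((PySem.List.pyRange 0 (PySem.Str.len s0) ((W:Int) * (H:Int))).map
        (fun i => PySem.Str.slice s0 (some i) (some (i + ((W:Int) * (H:Int)))))).map String.toList
      = pvChunks (W * H) s0.toList := by
    rw [List.map_map, hlenB,
      show (W:Int) * (H:Int) = ((W * H : Nat) : Int) by push_cast; ring,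
      ← pvRange_slices_eq_chunks (W * H) (Nat.mul_pos hW hH) s0.toList]
    apply List.map_congr_left
    intro i _
    simp [Function.comp, PySem.Str.toList_slice]
  -- A's lines, as char lists, are the w-chunks
  have hlinesToList :
      ((PySem.List.pyRange 0 (PySem.Str.len s0) (W:Int)).map
        (fun i => PySem.Str.slice s0 (some i) (some (i + (W:Int))))).map String.toList
      = pvChunks W s0.toList := by
    rw [List.map_map, hlenB, ← pvRange_slices_eq_chunks W hW s0.toList]
    apply List.map_congr_left
    intro i _
    simp [Function.comp, PySem.Str.toList_slice]
  -- A's image is the h-chunking of the lines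
  have hparse : parse_input s0 (W:Int) (H:Int) =
      pvChunks H ((PySem.List.pyRange 0 (PySem.Str.len s0) (W:Int)).map
        (fun i => PySem.Str.slice s0 (some i) (some (i + (W:Int))))) := by
    simp only [parse_input, PySem.List.foldl_append_singleton_eq_map, List.nil_append]
    exact pvRange_slices_eq_chunks H hH _
  -- abbreviations
  set linesA := (PySem.List.pyRange 0 (PySem.Str.len s0) (W:Int)).map
      (fun i => PySem.Str.slice s0 (some i) (some (i + (W:Int)))) with hLAdef
  set LB := (PySem.List.pyRange 0 (PySem.Str.len s0) ((W:Int) * (H:Int))).map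
      (fun i => PySem.Str.slice s0 (some i) (some (i + (W:Int) * (H:Int)))) with hLBdef
  set image := parse_input s0 (W:Int) (H:Int) with himgdef
  -- the flattened char-list view of A's image is B's layer list
  have hchain : (image.map (List.map String.toList)).map List.flatten = LB.map String.toList := by
    rw [hparse, ← pvChunks_map, hlinesToList, pvChunks_compose hW hH, hBtoList]
  -- per-layer count bridge
  have hlay : ∀ (layer : List String) (c : Char) (needle : String), needle.toList = [c] →
      ((layer.map (fun line => (PySem.Str.count line needle : Int))).sum)
        = (((layer.map String.toList).flatten.count c : Nat) : Int) := by
    intro layer c needle hn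
    have := pvLayerSum layer c needle hn
    simpa [PySem.Str.count_eq] using this
  -- A's counts list is B's layers mapped through the zero-count key
  have hcounts : image.map (fun layer => ((layer.map (fun line => (PySem.Str.count line "0" : Int))).sum))
      = LB.map (fun t => ((t.toList.count '0' : Nat) : Int)) := by
    calc image.map (fun layer => ((layer.map (fun line => (PySem.Str.count line "0" : Int))).sum))
        = image.map ((fun ll => ((ll.flatten.count '0' : Nat) : Int)) ∘ List.map String.toList) :=
          List.map_congr_left (fun layer _ => hlay layer '0' "0" rfl)
      _ = ((image.map (List.map String.toList)).map List.flatten).map (fun l => ((l.count '0' : Nat) : Int)) := by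
          simp [List.map_map, Function.comp]
      _ = (LB.map String.toList).map (fun l => ((l.count '0' : Nat) : Int)) := by rw [hchain]
      _ = LB.map (fun t => ((t.toList.count '0' : Nat) : Int)) := by simp [List.map_map, Function.comp]
  -- B's layer list is nonempty
  have hBne : LB ≠ [] := by
    intro h0
    have := hBtoList
    rw [h0] at this
    exact pvChunks_ne_nil (Nat.mul_pos hW hH) hsL this.symm
  obtain ⟨L0, Ls, hLB⟩ : ∃ L0 Ls, LB = L0 :: Ls := by
    rcases hLBe : LB with _ | ⟨a, t⟩
    · exact absurd hLBe hBne
    · exact ⟨a, t, rfl⟩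
  -- first-minimum data
  obtain ⟨b, k, h1, h2, h3, h4⟩ := pvArgmin (fun t : String => ((t.toList.count '0' : Nat) : Int)) Ls L0
  rw [← hLB] at h1 h2 h3 h4
  obtain ⟨hkmem, hLBk⟩ := List.getElem?_eq_some_iff.mp h4
  have hilen : image.length = LB.length := by
    have := congrArg List.length hcounts
    simpa using this
  have hkim : k < image.length := by omega
  have hflatk : ((image[k]'hkim).map String.toList).flatten = b.toList := by
    have := congrArg (fun l => l[k]?) hchain
    simp only [List.getElem?_map] at this
    rw [List.getElem?_eq_getElem hkim, List.getElem?_eq_getElem hkmem] at this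
    simp only [Option.map_some] at this
    injection this with this
    rw [this, hLBk]
  have hkey0 : (fun layer => PySem.Str.count layer "0") = (fun t : String => t.toList.count '0') :=
    funext (fun t => by
      rw [PySem.Str.count_eq, show ("0" : String).toList = ['0'] from rfl, pvCount_single])
  have hBmin : PySem.List.min? LB (fun layer => PySem.Str.count layer "0") = some b := by
    rw [hkey0, ← pvMin?_natCast]
    exact h1
  have hBval : part_one_alt (s0 :: rest) (W : Int) (H : Int)
      = (PySem.Str.count b "1" : Int) * (PySem.Str.count b "2" : Int) := by
    simp only [part_one_alt]
    rw [hget, ← hLBdef, hBmin]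
  have hAval : part_one (s0 :: rest) (W : Int) (H : Int)
      = ((b.toList.count '1' : Nat) : Int) * ((b.toList.count '2' : Nat) : Int) := by
    simp only [part_one]
    rw [hget, ← himgdef, hcounts]
    rw [h2]
    simp only [h3, Option.getD_some, PySem.List.pyGetD_natCast]
    rw [List.getD_eq_getElem _ _ hkim]
    rw [PySem.List.foldl_prod_mk (f := fun acc line => acc + (PySem.Str.count line "1" : Int))
        (g := fun acc line => acc + (PySem.Str.count line "2" : Int))]
    simp only [PySem.List.foldl_add, zero_add]
    rw [hlay _ '1' "1" rfl, hlay _ '2' "2" rfl, hflatk]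
  rw [show Spec_part_one (s0 :: rest) (W:Int) (H:Int) (part_one (s0 :: rest) (W:Int) (H:Int))
      = (part_one (s0 :: rest) (W:Int) (H:Int) = part_one_alt (s0 :: rest) (W:Int) (H:Int)) from rfl]
  rw [hAval, hBval, PySem.Str.count_eq, PySem.Str.count_eq,
    show ("1" : String).toList = ['1'] from rfl, show ("2" : String).toList = ['2'] from rfl,
    pvCount_single, pvCount_single]
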